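-- pv_equiv track=rewrite | github.com/bssrdf/pyleet | MaximumNumberofGroupsEnteringaCompetition.py | maximumGroups2
-- ===== SOURCE A (Python) =====
-- from typing import List
--
-- def maximumGroups2(grades: List[int]) -> int:
--     n = len(grades)
--     l, r = 1, n+1
--     while l < r:
--         m = l + (r-l)//2
--         if m*(m+1)//2 <= n:
--            l = m+1
--         else:
--            r = m
--     return l-1
-- ===== SOURCE B (Python) =====
-- import math
-- from typing import List
--
-- def maximumGroups2(grades: List[int]) -> int:
--     n = len(grades)
--     return (math.isqrt(8 * n + 1) - 1) // 2
-- ===== Notes on version B (the rewrite author's own statement) =====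
-- stated objective: simpler
-- what changed: Replaced the O(log n) binary search over k with the closed-form k = (isqrt(8n+1)-1)//2 using exact integer square root.
import Mathlib
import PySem

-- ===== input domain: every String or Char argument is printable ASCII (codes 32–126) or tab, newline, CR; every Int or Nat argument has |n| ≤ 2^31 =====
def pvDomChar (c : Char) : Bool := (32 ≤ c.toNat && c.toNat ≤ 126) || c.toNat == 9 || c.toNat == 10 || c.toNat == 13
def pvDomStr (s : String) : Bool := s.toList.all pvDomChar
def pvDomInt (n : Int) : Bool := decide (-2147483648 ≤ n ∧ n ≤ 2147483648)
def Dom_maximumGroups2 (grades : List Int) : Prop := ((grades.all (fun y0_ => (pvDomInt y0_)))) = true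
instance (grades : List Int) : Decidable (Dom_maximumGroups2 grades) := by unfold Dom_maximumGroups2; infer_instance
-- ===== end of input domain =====

-- Header: B replaces A's binary search by the closed form (isqrt(8n+1)-1)//2 — simpler, loop-free.


-- ===== PORT A =====
-- the while loop of A: state (l, r), returns the final l; fuel bounds the iteration count
-- (each iteration shrinks r-l by at least 1, so fuel = initial r-l suffices; the caller passes n+1)
def pvLoopA (fuel : Nat) (n l r : Int) : Int :=
  match fuel with
  | 0 => l
  | fuel' + 1 =>
    if l < r then
      let m := l + PySem.Int.floordiv (r - l) 2
      if PySem.Int.floordiv (m * (m + 1)) 2 ≤ n then pvLoopA fuel' n (m + 1) r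
      else pvLoopA fuel' n l m
    else l

def maximumGroups2 (grades : List Int) : Int :=
  let n : Int := grades.length
  pvLoopA (grades.length + 1) n 1 (n + 1) - 1

-- ===== PORT B =====
-- math.isqrt ported as Nat.sqrt (both are the exact integer square root)
def maximumGroups2_alt (grades : List Int) : Int :=
  let n : Int := grades.length
  PySem.Int.floordiv ((Nat.sqrt (8 * n + 1).toNat : Int) - 1) 2

-- ===== PRECONDITION & SPEC =====
def Spec_maximumGroups2 (grades : List Int) (out : Int) : Prop := out = maximumGroups2_alt grades
instance (grades : List Int) (out : Int) : Decidable (Spec_maximumGroups2 grades out) := by unfold Spec_maximumGroups2; infer_instance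

-- ===== CLAIM (what is proved, stated in full; the proofs are below) =====
def Claim_equal_maximumGroups2 : Prop := ∀ (grades : List Int), Dom_maximumGroups2 grades → Spec_maximumGroups2 grades (maximumGroups2 grades)

-- ===== LEMMAS AND PROOFS =====

-- midpoint test: m*(m+1)//2 ≤ n ↔ m*(m+1) ≤ 2n  (m*(m+1) is even)
theorem pv_half_le (m n : Int) :
    (PySem.Int.floordiv (m * (m + 1)) 2 ≤ n) ↔ m * (m + 1) ≤ 2 * n := by
  obtain ⟨k, hk⟩ := Int.even_mul_succ_self m
  have := PySem.Int.floordiv_eq_ediv_of_pos (a := m * (m + 1)) (b := 2) (by omega)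
  rw [this, hk]
  omega

-- invariant of A's binary search: with enough fuel the loop returns the r (= l) of a bracketing pair
theorem pvLoopA_char (fuel : Nat) (n l r : Int) (hf : (r - l).toNat ≤ fuel) (h1 : 1 ≤ l) (h2 : l ≤ r)
    (hlo : (l - 1) * l ≤ 2 * n) (hhi : 2 * n < r * (r + 1)) :
    1 ≤ pvLoopA fuel n l r ∧
    (pvLoopA fuel n l r - 1) * (pvLoopA fuel n l r) ≤ 2 * n ∧
    2 * n < (pvLoopA fuel n l r) * (pvLoopA fuel n l r + 1) := by
  induction fuel generalizing l r with
  | zero =>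
    have hlr : l = r := by omega
    simp only [pvLoopA]
    refine ⟨h1, hlo, ?_⟩
    rw [hlr]; exact hhi
  | succ fuel' ih =>
    by_cases hlr : l < r
    · have hmid := PySem.Int.floordiv_eq_ediv_of_pos (a := r - l) (b := 2) (by omega)
      simp only [pvLoopA, hlr, if_true]
      set m := l + PySem.Int.floordiv (r - l) 2 with hm
      have hml : l ≤ m ∧ m < r := by rw [hm, hmid]; omega
      by_cases ht : PySem.Int.floordiv (m * (m + 1)) 2 ≤ n
      · simp only [ht, if_true]
        have hmn : m * (m + 1) ≤ 2 * n := (pv_half_le m n).mp ht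
        have heq : (m + 1 - 1) * (m + 1) = m * (m + 1) := by ring
        exact ih (m + 1) r (by rw [hm, hmid] at *; omega) (by omega) (by omega) (by omega) hhi
      · simp only [ht, if_false]
        have hmn : ¬ m * (m + 1) ≤ 2 * n := fun hc => ht ((pv_half_le m n).mpr hc)
        exact ih l m (by rw [hm, hmid] at *; omega) h1 (by omega) hlo (by omega)
    · simp only [pvLoopA, hlr, if_false]
      have hlr' : l = r := by omega
      refine ⟨h1, hlo, ?_⟩
      rw [hlr']; exact hhi

-- B's value satisfies the same bracketing
theorem pvAlt_char (grades : List Int) :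
    0 ≤ maximumGroups2_alt grades ∧
    (maximumGroups2_alt grades) * (maximumGroups2_alt grades + 1) ≤ 2 * (grades.length : Int) ∧
    2 * (grades.length : Int) < (maximumGroups2_alt grades + 1) * (maximumGroups2_alt grades + 2) := by
  set n : Int := (grades.length : Int) with hn
  have hn0 : 0 ≤ n := hn ▸ Int.natCast_nonneg _
  set N : Nat := (8 * n + 1).toNat with hN
  have hNn : (N : Int) = 8 * n + 1 := by omega
  set s : Nat := Nat.sqrt N with hs
  have hs1 : s * s ≤ N := by have := Nat.sqrt_le' N; rw [pow_two] at this; exact this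
  have hs2 : N < (s + 1) * (s + 1) := by
    have := Nat.lt_succ_sqrt N
    simpa [Nat.succ_eq_add_one] using this
  have hspos : 1 ≤ s := by
    by_contra h
    have h0 : s = 0 := by omega
    rw [h0] at hs2; omega
  have hfd := PySem.Int.floordiv_eq_ediv_of_pos (a := (s : Int) - 1) (b := 2) (by omega)
  have halt : maximumGroups2_alt grades = ((s : Int) - 1) / 2 := by
    simp only [maximumGroups2_alt, ← hn, ← hN, ← hs, hfd]
  set k : Int := ((s : Int) - 1) / 2 with hk
  have hk1 : 2 * k + 1 ≤ (s : Int) ∧ (s : Int) ≤ 2 * k + 2 := by omega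
  have hk0 : 0 ≤ k := by omega
  have hss : ((s : Int)) * (s : Int) ≤ 8 * n + 1 := by
    have h := hs1
    have : ((s * s : Nat) : Int) ≤ (N : Int) := by exact_mod_cast h
    push_cast at this; omega
  have hss2 : 8 * n + 1 < ((s : Int) + 1) * ((s : Int) + 1) := by
    have h := hs2
    have : (N : Int) < (((s + 1) * (s + 1) : Nat) : Int) := by exact_mod_cast h
    push_cast at this; omega
  rw [halt]
  refine ⟨hk0, ?_, ?_⟩
  · -- (2k+1)² ≤ s² ≤ 8n+1, and (2k+1)² = 4·k(k+1)+1
    have hmul : (2 * k + 1) * (2 * k + 1) ≤ (s : Int) * (s : Int) :=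
      mul_le_mul hk1.1 hk1.1 (by omega) (by omega)
    have hring : (2 * k + 1) * (2 * k + 1) = 4 * (k * (k + 1)) + 1 := by ring
    have : 4 * (k * (k + 1)) + 1 ≤ 8 * n + 1 := by
      rw [← hring]; exact le_trans hmul hss
    omega
  · -- 8n+1 < (s+1)² ≤ (2k+3)², and (2k+3)² = 4·(k+1)(k+2)+1
    have hmul : ((s : Int) + 1) * ((s : Int) + 1) ≤ (2 * k + 3) * (2 * k + 3) :=
      mul_le_mul (by omega) (by omega) (by omega) (by omega)
    have hring : (2 * k + 3) * (2 * k + 3) = 4 * ((k + 1) * (k + 2)) + 1 := by ring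
    have : 8 * n + 1 < 4 * ((k + 1) * (k + 2)) + 1 := by
      rw [← hring]; exact lt_of_lt_of_le hss2 hmul
    omega

-- uniqueness of the bracketing value
theorem pv_unique (n a b : Int) (ha0 : 0 ≤ a) (hb0 : 0 ≤ b)
    (ha1 : a * (a + 1) ≤ 2 * n) (ha2 : 2 * n < (a + 1) * (a + 2))
    (hb1 : b * (b + 1) ≤ 2 * n) (hb2 : 2 * n < (b + 1) * (b + 2)) : a = b := by
  by_contra h
  rcases lt_or_gt_of_ne h with hlt | hlt
  · have : (a + 1) * (a + 2) ≤ b * (b + 1) :=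
      mul_le_mul (by omega) (by omega) (by omega) (by omega)
    omega
  · have : (b + 1) * (b + 2) ≤ a * (a + 1) :=
      mul_le_mul (by omega) (by omega) (by omega) (by omega)
    omega

-- ===== VERDICT (by name: the statement is the Claim_ definition above) =====
theorem maximumGroups2_spec : Claim_equal_maximumGroups2 := by
  intro grades _
  unfold Spec_maximumGroups2
  set n : Int := (grades.length : Int) with hn
  have hn0 : 0 ≤ n := hn ▸ Int.natCast_nonneg _
  have hsq : 0 ≤ n * n := mul_nonneg hn0 hn0
  have hinit : 2 * n < (n + 1) * (n + 2) := by
    have : (n + 1) * (n + 2) = n * n + 3 * n + 2 := by ring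
    omega
  have hA := pvLoopA_char (grades.length + 1) n 1 (n + 1) (by omega) (by omega) (by omega) (by omega) hinit
  have hB := pvAlt_char grades
  rw [← hn] at hB
  have hAval : maximumGroups2 grades = pvLoopA (grades.length + 1) n 1 (n + 1) - 1 := by
    simp only [maximumGroups2, ← hn]
  rw [hAval]
  set v := pvLoopA (grades.length + 1) n 1 (n + 1) with hv
  have hA1 : (v - 1) * ((v - 1) + 1) ≤ 2 * n := by
    have heq : (v - 1) * ((v - 1) + 1) = (v - 1) * v := by ring
    rw [heq]; exact hA.2.1
  have hA2 : 2 * n < ((v - 1) + 1) * ((v - 1) + 2) := by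
    have heq : ((v - 1) + 1) * ((v - 1) + 2) = v * (v + 1) := by ring
    rw [heq]; exact hA.2.2
  exact pv_unique n (v - 1) (maximumGroups2_alt grades) (by omega) hB.1 hA1 hA2 hB.2.1 hB.2.2
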